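-- pv_equiv track=rewrite | github.com/yohi/magi-core | src/magi/security/filter.py | _escape_control_sequences
-- ===== SOURCE A (Python) =====
-- def _escape_control_sequences(text: str) -> str:
--     """テンプレート境界や制御記号をエスケープ"""
--     replacements = {
--         "{{": "\\{{",
--         "}}": "\\}}",
--         "<<": "\\<<",
--         ">>": "\\>>",
--         "[[": "\\[[",
--         "]]": "\\]]",
--     }
--     escaped = text
--     for needle, repl in replacements.items():
--         escaped = escaped.replace(needle, repl)
--     return escaped
-- ===== SOURCE B (Python) =====
-- def _escape_control_sequences(text: str) -> str:
--     """Single left-to-right pass: escape each of the six two-char pairs in place."""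
--     pairs = {"{{", "}}", "<<", ">>", "[[", "]]"}
--     out = []
--     i = 0
--     n = len(text)
--     while i < n:
--         two = text[i:i + 2]
--         if two in pairs:
--             out.append("\\" + two)
--             i += 2
--         else:
--             out.append(text[i])
--             i += 1
--     return "".join(out)
-- ===== Notes on version B (the rewrite author's own statement) =====
-- stated objective: alternative
-- what changed: B replaces A's six sequential full-string str.replace passes by one single left-to-right character scan that escapes any of the six doubled-character pairs as it goes; same asymptotic cost, and in CPython the interpreted scan is slower than the C-implemented replaces.
import Mathlib
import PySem

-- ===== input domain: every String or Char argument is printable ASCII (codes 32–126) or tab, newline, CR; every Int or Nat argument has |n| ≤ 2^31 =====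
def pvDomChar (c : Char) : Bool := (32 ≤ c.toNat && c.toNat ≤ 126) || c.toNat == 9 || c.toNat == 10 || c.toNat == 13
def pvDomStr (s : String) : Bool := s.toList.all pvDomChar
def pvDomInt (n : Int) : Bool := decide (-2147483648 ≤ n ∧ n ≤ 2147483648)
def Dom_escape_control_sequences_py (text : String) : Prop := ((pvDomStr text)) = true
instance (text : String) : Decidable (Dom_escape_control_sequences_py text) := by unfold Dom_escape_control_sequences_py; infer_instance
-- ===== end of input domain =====

-- B replaces A's six sequential full-string str.replace passes by one single
-- left-to-right character scan over the input (objective: alternative single-pass algorithm).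


-- ===== PORT A =====
def escape_control_sequences_py (text : String) : String :=
  let replacements : PySem.Dict String String :=
    ⟨[("{{", "\\{{"), ("}}", "\\}}"), ("<<", "\\<<"),
      (">>", "\\>>"), ("[[", "\\[["), ("]]", "\\]]")]⟩
  (PySem.Dict.items replacements).foldl
    (fun escaped nr => PySem.Str.replace escaped nr.1 nr.2) text

-- ===== PORT B =====
-- single pass: at each position, if the next two chars are one of the six pairs,
-- emit '\' plus the pair and advance 2, else emit the char and advance 1
def escGo : List Char → List Char
  | a :: b :: t =>
      if a == b &&
          (a == '{' || a == '}' || a == '<' || a == '>' || a == '[' || a == ']') then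
        '\\' :: a :: b :: escGo t
      else
        a :: escGo (b :: t)
  | l => l

def escape_control_sequences_py_alt (text : String) : String :=
  String.ofList (escGo text.toList)

-- ===== PRECONDITION & SPEC =====
def Spec_escape_control_sequences_py (text : String) (out : String) : Prop := out = escape_control_sequences_py_alt text
instance (text : String) (out : String) : Decidable (Spec_escape_control_sequences_py text out) := by unfold Spec_escape_control_sequences_py; infer_instance

-- ===== CLAIM (what is proved, stated in full; the proofs are below) =====
def Claim_equal_escape_control_sequences_py : Prop := ∀ (text : String), Dom_escape_control_sequences_py text → Spec_escape_control_sequences_py text (escape_control_sequences_py text)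

-- ===== LEMMAS AND PROOFS =====

-- generic single pass escaping doubled chars whose char satisfies p
def escM (p : Char → Bool) : List Char → List Char
  | a :: b :: t =>
      if a == b && p a then '\\' :: a :: b :: escM p t
      else a :: escM p (b :: t)
  | l => l

@[simp] lemma escM_nil (p : Char → Bool) : escM p [] = [] := rfl
@[simp] lemma escM_single (p : Char → Bool) (a : Char) : escM p [a] = [a] := rfl
lemma escM_cons₂ (p : Char → Bool) (a b : Char) (t : List Char) :
    escM p (a :: b :: t) =
      if a == b && p a then '\\' :: a :: b :: escM p t
      else a :: escM p (b :: t) := rfl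

lemma escM_cons_of_not (p : Char → Bool) (a : Char) (t : List Char) (h : p a = false) :
    escM p (a :: t) = a :: escM p t := by
  cases t with
  | nil => rfl
  | cons b t' => simp [escM_cons₂, h]

lemma escM_head? (p : Char → Bool) (b : Char) (t : List Char) :
    (escM p (b :: t)).head? = some b ∨ (escM p (b :: t)).head? = some '\\' := by
  cases t with
  | nil => left; rfl
  | cons c t' =>
      rw [escM_cons₂]
      split
      · right; rfl
      · left; rfl

-- the single-needle pass (· == d) does not fire at a when either a ≠ d or the next char ≠ d
lemma escOne_cons (d a : Char) (xs : List Char)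
    (h : ¬ (a = d ∧ xs.head? = some d)) :
    escM (· == d) (a :: xs) = a :: escM (· == d) xs := by
  cases xs with
  | nil => rfl
  | cons y ys =>
      rw [escM_cons₂]
      have hc : (a == y && a == d) = false := by
        by_cases had : a = d
        · by_cases hy : y = d
          · exact absurd ⟨had, by simp [hy]⟩ h
          · subst had
            simp only [Bool.and_eq_false_iff, beq_eq_false_iff_ne, ne_eq]
            left
            exact fun he => hy he.symm
        · simp only [Bool.and_eq_false_iff, beq_eq_false_iff_ne, ne_eq]
          right; exact had
      simp [hc]

-- Chars.replace with needle [c,c] and replacement ['\\',c,c] is exactly the single pass escM (· == c)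
lemma replace_go_eq (c : Char) :
    ∀ (fuel : Nat) (l acc : List Char), l.length ≤ fuel →
      PySem.Chars.replace.go [c, c] ['\\', c, c] fuel l acc =
        acc.reverse ++ escM (· == c) l := by
  intro fuel
  induction fuel with
  | zero =>
      intro l acc h
      have : l = [] := List.length_eq_zero_iff.mp (Nat.le_zero.mp h)
      subst this
      simp [PySem.Chars.replace.go]
  | succ f ih =>
      intro l acc h
      cases l with
      | nil => simp [PySem.Chars.replace.go]
      | cons a t =>
          cases t with
          | nil =>
              have hpre : [c, c].isPrefixOf [a] = false := by
                simp [List.isPrefixOf]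
              simp only [PySem.Chars.replace.go, hpre]
              rw [ih [] (a :: acc) (by simp)]
              simp
          | cons b t' =>
              by_cases hab : a = c ∧ b = c
              · obtain ⟨ha, hb⟩ := hab
                have hpre : [c, c].isPrefixOf (a :: b :: t') = true := by
                  simp [List.isPrefixOf, ha, hb]
                simp only [PySem.Chars.replace.go, hpre, if_true]
                have hdrop : List.drop [c, c].length (a :: b :: t') = t' := rfl
                rw [hdrop]
                rw [ih t' (['\\', c, c].reverse ++ acc)
                    (by simp at h ⊢; omega)]
                rw [escM_cons₂]
                simp [ha, hb]
              · have hpre : [c, c].isPrefixOf (a :: b :: t') = false := by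
                  simp only [List.isPrefixOf, Bool.and_true, Bool.and_eq_false_iff, beq_eq_false_iff_ne, ne_eq]
                  by_cases h1 : a = c
                  · right; exact fun he => hab ⟨h1, he.symm⟩
                  · left; exact fun he => h1 he.symm
                simp only [PySem.Chars.replace.go, hpre]
                rw [ih (b :: t') (a :: acc) (by simp at h ⊢; omega)]
                rw [escM_cons₂]
                have hc2 : (a == b && a == c) = false := by
                  simp only [Bool.and_eq_false_iff, beq_eq_false_iff_ne, ne_eq]
                  by_cases h1 : a = b
                  · right; exact fun h2 => hab ⟨h2, h1 ▸ h2⟩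
                  · left; exact h1
                simp [hc2]

lemma replace_eq_escM (c : Char) (l : List Char) :
    PySem.Chars.replace l [c, c] ['\\', c, c] = escM (· == c) l := by
  rw [PySem.Chars.replace]
  simp only [List.isEmpty_cons, if_false, Bool.false_eq_true]
  exact replace_go_eq c l.length l [] le_rfl

-- composing a fresh single-needle pass (· == d) after a multi pass escM p adds d to the predicate
lemma step_lemma (p : Char → Bool) (d : Char)
    (hd : p d = false) (hb : d ≠ '\\') (hpb : p '\\' = false) :
    ∀ (n : Nat) (l : List Char), l.length ≤ n →
      escM (· == d) (escM p l) = escM (fun c => p c || c == d) l := by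
  intro n
  induction n with
  | zero =>
      intro l h
      have : l = [] := List.length_eq_zero_iff.mp (Nat.le_zero.mp h)
      subst this; rfl
  | succ m ih =>
      intro l h
      match l with
      | [] => rfl
      | [a] => rfl
      | a :: b :: t =>
        by_cases hfire : a = b ∧ p a = true
        · obtain ⟨hab, hpa⟩ := hfire
          have had : a ≠ d := by
            intro he
            rw [he, hd] at hpa
            exact absurd hpa (by simp)
          have hc : (a == b && p a) = true := by simp [← hab, hpa]
          rw [escM_cons₂, hc]
          simp only [if_true]
          rw [escOne_cons d '\\' _ (fun hc => hb hc.1.symm)]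
          rw [escOne_cons d a _ (fun hc => had hc.1)]
          rw [escOne_cons d b _ (fun hc => had (by rw [hab]; exact hc.1))]
          rw [ih t (by simp at h ⊢; omega)]
          rw [escM_cons₂]
          have hc2 : (a == b && (p a || a == d)) = true := by simp [← hab, hpa]
          rw [hc2]
          simp only [if_true]
        · by_cases hdd : a = d ∧ b = d
          · obtain ⟨ha, hbd⟩ := hdd
            have hpa : p a = false := by rw [ha]; exact hd
            have hpb2 : p b = false := by rw [hbd]; exact hd
            rw [escM_cons_of_not p a _ hpa, escM_cons_of_not p b _ hpb2]
            have hc : (a == b && a == d) = true := by simp [ha, hbd]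
            rw [escM_cons₂, hc]
            simp only [if_true]
            rw [ih t (by simp at h ⊢; omega)]
            rw [escM_cons₂]
            have hc2 : (a == b && (p a || a == d)) = true := by simp [ha, hbd]
            rw [hc2]
            simp only [if_true]
          · have hnof : (a == b && p a) = false := by
              by_cases h1 : a = b
              · by_cases h2 : p a = true
                · exact absurd ⟨h1, h2⟩ hfire
                · simp [h2]
              · simp only [Bool.and_eq_false_iff, beq_eq_false_iff_ne, ne_eq]
                left; exact h1
            rw [escM_cons₂, hnof]
            simp only [Bool.false_eq_true, if_false]
            have hhead : ¬ (a = d ∧ (escM p (b :: t)).head? = some d) := by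
              rintro ⟨had, hh⟩
              rcases escM_head? p b t with h' | h'
              · rw [h'] at hh
                have hb' : b = d := Option.some.inj hh
                exact hdd ⟨had, hb'⟩
              · rw [h'] at hh
                have hb' : '\\' = d := Option.some.inj hh
                exact hb hb'.symm
            rw [escOne_cons d a _ hhead]
            rw [ih (b :: t) (by simp at h ⊢; omega)]
            rw [escM_cons₂]
            have hc3 : (a == b && (p a || a == d)) = false := by
              by_cases h1 : a = b
              · subst h1
                by_cases h2 : a = d
                · exact absurd ⟨h2, h2⟩ hdd
                · by_cases h3 : p a = true
                  · exact absurd ⟨rfl, h3⟩ hfire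
                  · simp only [Bool.and_eq_false_iff, Bool.or_eq_false_iff]
                    right
                    exact ⟨by simp [h3], by simp [h2]⟩
              · simp only [Bool.and_eq_false_iff, beq_eq_false_iff_ne, ne_eq]
                left; exact h1
            simp [hc3]

-- B's pass is escM with the six-char predicate
lemma escGo_eq_escM : ∀ (l : List Char),
    escGo l = escM (fun c =>
      c == '{' || c == '}' || c == '<' || c == '>' || c == '[' || c == ']') l
  | [] => rfl
  | [_] => rfl
  | a :: b :: t => by
      rw [escGo, escM_cons₂, escGo_eq_escM t, escGo_eq_escM (b :: t)]

-- ===== VERDICT (by name: the statement is the Claim_ definition above) =====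
theorem escape_control_sequences_py_spec : Claim_equal_escape_control_sequences_py := by
  intro text _
  unfold Spec_escape_control_sequences_py
  unfold escape_control_sequences_py escape_control_sequences_py_alt
  simp only [List.foldl, PySem.Str.replace, String.toList_ofList]
  simp only [show ("{{" : String).toList = ['{','{'] from rfl,
             show ("}}" : String).toList = ['}','}'] from rfl,
             show ("<<" : String).toList = ['<','<'] from rfl,
             show (">>" : String).toList = ['>','>'] from rfl,
             show ("[[" : String).toList = ['[','['] from rfl,
             show ("]]" : String).toList = [']',']'] from rfl,
             show ("\\{{" : String).toList = ['\\','{','{'] from rfl,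
             show ("\\}}" : String).toList = ['\\','}','}'] from rfl,
             show ("\\<<" : String).toList = ['\\','<','<'] from rfl,
             show ("\\>>" : String).toList = ['\\','>','>'] from rfl,
             show ("\\[[" : String).toList = ['\\','[','['] from rfl,
             show ("\\]]" : String).toList = ['\\',']',']'] from rfl]
  rw [replace_eq_escM, replace_eq_escM, replace_eq_escM, replace_eq_escM,
      replace_eq_escM, replace_eq_escM]
  rw [step_lemma (· == '{') '}' (by decide) (by decide) (by decide)
        text.toList.length text.toList le_rfl]
  rw [step_lemma _ '<' (by decide) (by decide) (by decide)
        text.toList.length text.toList le_rfl]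
  rw [step_lemma _ '>' (by decide) (by decide) (by decide)
        text.toList.length text.toList le_rfl]
  rw [step_lemma _ '[' (by decide) (by decide) (by decide)
        text.toList.length text.toList le_rfl]
  rw [step_lemma _ ']' (by decide) (by decide) (by decide)
        text.toList.length text.toList le_rfl]
  rw [escGo_eq_escM]
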